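-- pv_equiv track=rewrite | github.com/grigoredp/hangman-py | server_hangman.py | statusJoc
-- ===== SOURCE A (Python) =====
-- def statusJoc(litereGhicite, cuvant, incercari):
--   secret = "_"*len(cuvant)
--   secretlista = list(secret)
--   for lt in litereGhicite:
--     for poz,lit in enumerate(cuvant):
--       if(lit == lt):
--           secretlista[poz] = lt
--   hangw = "HANGMAN"
--   hangwl = list(hangw)
--   hangStatus=[]
--   for x in range(incercari):
--     hangStatus.append(hangwl[x])
--   rasp = "[ " + ' '.join(secretlista) + " ] " + "[" + ''.join(hangStatus) + "]"
--   return rasp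
-- ===== SOURCE B (Python) =====
-- def statusJoc(litereGhicite, cuvant, incercari):
--     guessed = set(litereGhicite)
--     mask = ' '.join(c if c in guessed else '_' for c in cuvant)
--     hang = "HANGMAN"[:incercari] if incercari > 0 else ""
--     return "[ " + mask + " ] [" + hang + "]"
-- ===== Notes on version B (the rewrite author's own statement) =====
-- stated objective: simpler
-- what changed: The nested guesses-by-word double loop that mutates a mask list is replaced by one pass over the word with set membership, and the gallows loop is replaced by a string slice; B returns the full gallows where A raises IndexError (incercari > 7).
import Mathlib
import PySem

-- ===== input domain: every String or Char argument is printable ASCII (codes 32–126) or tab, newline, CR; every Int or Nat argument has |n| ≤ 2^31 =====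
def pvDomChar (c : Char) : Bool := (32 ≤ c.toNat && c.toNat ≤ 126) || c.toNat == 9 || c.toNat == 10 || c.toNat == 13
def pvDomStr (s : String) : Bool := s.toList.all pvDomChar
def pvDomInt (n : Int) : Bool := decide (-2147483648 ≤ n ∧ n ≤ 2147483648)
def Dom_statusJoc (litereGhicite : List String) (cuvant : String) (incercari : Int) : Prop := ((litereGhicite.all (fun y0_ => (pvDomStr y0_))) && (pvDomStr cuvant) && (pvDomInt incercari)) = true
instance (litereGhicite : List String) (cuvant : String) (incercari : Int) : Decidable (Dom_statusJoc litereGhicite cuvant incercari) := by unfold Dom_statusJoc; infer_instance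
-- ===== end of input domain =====

-- B replaces A's nested guesses×word mask loop by one pass over the word with set
-- membership, and the gallows index loop by a slice (objective: simpler).

-- ===== PORT A =====
-- A's `secretlista` is a Python list of 1-character strings; ported as List String.
def statusJoc (litereGhicite : List String) (cuvant : String) (incercari : Int) : String :=
  let secretlista : List String := List.replicate cuvant.toList.length "_"
  let secretlista : List String := litereGhicite.foldl (fun s lt =>
    (PySem.List.enumerate cuvant.toList 0).foldl (fun s pl =>
      if String.ofList [pl.2] == lt then PySem.List.pySetD s pl.1 lt else s) s) secretlista
  let hangwl : List String := "HANGMAN".toList.map (fun c => String.ofList [c])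
  -- hangwl[x]: in range for every x in range(incercari) under Pre_; default never read there
  let hangStatus : List String := (PySem.List.pyRange 0 incercari 1).foldl
    (fun acc x => acc ++ [PySem.List.pyGetD hangwl x ""]) []
  "[ " ++ PySem.Str.join " " secretlista ++ " ] " ++ "[" ++ PySem.Str.join "" hangStatus ++ "]"

-- ===== PORT B =====
def statusJoc_alt (litereGhicite : List String) (cuvant : String) (incercari : Int) : String :=
  let guessed : PySem.Set String := PySem.Set.ofList litereGhicite
  let mask : String := PySem.Str.join " " (cuvant.toList.map (fun c =>
    if PySem.Set.contains guessed (String.ofList [c]) then String.ofList [c] else "_"))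
  let hang : String := if incercari > 0 then PySem.Str.slice "HANGMAN" none (some incercari) else ""
  "[ " ++ mask ++ " ] [" ++ hang ++ "]"

-- ===== PRECONDITION & SPEC =====
-- Pre_ excludes exactly incercari ≥ 8, where A raises IndexError indexing "HANGMAN".
def Pre_statusJoc (litereGhicite : List String) (cuvant : String) (incercari : Int) : Prop :=
  incercari ≤ 7
instance (litereGhicite : List String) (cuvant : String) (incercari : Int) : Decidable (Pre_statusJoc litereGhicite cuvant incercari) := by unfold Pre_statusJoc; infer_instance
def pvWitness_statusJoc : List String × String × Int := (["a", "n"], "banana", 3)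

def Spec_statusJoc (litereGhicite : List String) (cuvant : String) (incercari : Int) (out : String) : Prop := out = statusJoc_alt litereGhicite cuvant incercari
instance (litereGhicite : List String) (cuvant : String) (incercari : Int) (out : String) : Decidable (Spec_statusJoc litereGhicite cuvant incercari out) := by unfold Spec_statusJoc; infer_instance

-- ===== CLAIM (what is proved, stated in full; the proofs are below) =====
def Claim_equal_statusJoc : Prop := ∀ (litereGhicite : List String) (cuvant : String) (incercari : Int), Dom_statusJoc litereGhicite cuvant incercari → Pre_statusJoc litereGhicite cuvant incercari → Spec_statusJoc litereGhicite cuvant incercari (statusJoc litereGhicite cuvant incercari)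
-- ===== LEMMAS AND PROOFS =====

-- the value a mask cell holds after processing the guesses `gs`
def pvMaskOf (gs : List String) (cs : List Char) : List String :=
  cs.map (fun c => if gs.any (fun lt => String.ofList [c] == lt) then String.ofList [c] else "_")

theorem pv_set_append_len {α : Type} (s1 : List α) (y v : α) (t : List α) :
    (s1 ++ y :: t).set s1.length v = s1 ++ v :: t := by
  induction s1 with
  | nil => rfl
  | cons a s1 ih => simp [ih]

-- A's inner enumerate-loop, applied to a state split s1 ++ s2, rewrites the s2 region pointwise
theorem pv_inner_eq (lt : String) : ∀ (cs : List Char) (s1 s2 : List String),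
    s2.length = cs.length →
    (PySem.List.enumerate cs (s1.length : Int)).foldl (fun s pl =>
        if String.ofList [pl.2] == lt then PySem.List.pySetD s pl.1 lt else s) (s1 ++ s2)
    = s1 ++ List.zipWith (fun c cur => if String.ofList [c] == lt then lt else cur) cs s2 := by
  intro cs
  induction cs with
  | nil =>
    intro s1 s2 h
    simp [PySem.List.enumerate_nil, List.length_eq_zero_iff.mp h]
  | cons c cs ih =>
    intro s1 s2 h
    cases s2 with
    | nil => simp at h
    | cons y s2' =>
      rw [PySem.List.enumerate_cons]
      simp only [List.foldl_cons, List.zipWith_cons_cons]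
      have hset : PySem.List.pySetD (s1 ++ y :: s2') (s1.length : Int) lt
          = s1 ++ lt :: s2' := by
        rw [PySem.List.pySetD_natCast, pv_set_append_len]
      have hlen : s2'.length = cs.length := by simpa using h
      by_cases hc : String.ofList [c] == lt
      · have h1 : ((s1.length : Int) + 1) = (((s1 ++ [lt]).length : Int)) := by
          simp
        rw [if_pos hc, hset, if_pos hc, h1]
        have h2 := ih (s1 ++ [lt]) s2' hlen
        rw [List.append_assoc, List.singleton_append] at h2
        rw [h2, List.append_assoc, List.singleton_append]
      · have h1 : ((s1.length : Int) + 1) = (((s1 ++ [y]).length : Int)) := by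
          simp
        rw [if_neg hc, if_neg hc, h1]
        have h2 := ih (s1 ++ [y]) s2' hlen
        rw [List.append_assoc, List.singleton_append] at h2
        rw [h2, List.append_assoc, List.singleton_append]

theorem pv_mask_step (lt : String) (gs : List String) (cs : List Char) :
    List.zipWith (fun c cur => if String.ofList [c] == lt then lt else cur) cs (pvMaskOf gs cs)
    = pvMaskOf (gs ++ [lt]) cs := by
  unfold pvMaskOf
  rw [List.zipWith_map_right, List.zipWith_self]
  apply List.map_congr_left
  intro c _
  by_cases hc : String.ofList [c] == lt
  · have hceq : String.ofList [c] = lt := eq_of_beq hc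
    simp [List.any_append, hceq]
  · simp [List.any_append, hc]

theorem pv_outer_eq (cs : List Char) : ∀ (gs pre : List String),
    gs.foldl (fun s lt =>
      (PySem.List.enumerate cs 0).foldl (fun s pl =>
        if String.ofList [pl.2] == lt then PySem.List.pySetD s pl.1 lt else s) s) (pvMaskOf pre cs)
    = pvMaskOf (pre ++ gs) cs := by
  intro gs
  induction gs with
  | nil => intro pre; simp
  | cons lt gs ih =>
    intro pre
    simp only [List.foldl_cons]
    have hlen : (pvMaskOf pre cs).length = cs.length := by simp [pvMaskOf]
    have hstep :
        (PySem.List.enumerate cs 0).foldl (fun s pl =>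
          if String.ofList [pl.2] == lt then PySem.List.pySetD s pl.1 lt else s) (pvMaskOf pre cs)
        = pvMaskOf (pre ++ [lt]) cs := by
      have h2 := pv_inner_eq lt cs [] (pvMaskOf pre cs) hlen
      rw [List.nil_append, List.nil_append, pv_mask_step] at h2
      simpa using h2
    rw [hstep, ih, List.append_assoc, List.singleton_append]

theorem pv_mask_eq (litereGhicite : List String) (cs : List Char) :
    litereGhicite.foldl (fun s lt =>
      (PySem.List.enumerate cs 0).foldl (fun s pl =>
        if String.ofList [pl.2] == lt then PySem.List.pySetD s pl.1 lt else s)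
      s) (List.replicate cs.length "_")
    = cs.map (fun c =>
        if PySem.Set.contains (PySem.Set.ofList litereGhicite) (String.ofList [c])
        then String.ofList [c] else "_") := by
  have h0 : (List.replicate cs.length "_") = pvMaskOf [] cs := by
    simp [pvMaskOf, List.map_const']
  rw [h0, pv_outer_eq cs litereGhicite []]
  unfold pvMaskOf
  apply List.map_congr_left
  intro c _
  congr 1
  rw [List.nil_append]
  simp [PySem.Set.contains, PySem.Set.mem_ofList, List.any_beq]

-- the gallows part only depends on incercari; under Pre_ the loop equals the slice
theorem pv_hang_eq (incercari : Int) (h : incercari ≤ 7) :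
    PySem.Str.join "" ((PySem.List.pyRange 0 incercari 1).foldl
      (fun acc x => acc ++ [PySem.List.pyGetD ("HANGMAN".toList.map (fun c => String.ofList [c])) x ""]) [])
    = (if incercari > 0 then PySem.Str.slice "HANGMAN" none (some incercari) else "") := by
  by_cases h0 : incercari ≤ 0
  · rw [PySem.List.pyRange_one_eq_nil h0, if_neg (by omega)]
    decide
  · rw [if_pos (by omega)]
    have h1 : 1 ≤ incercari := by omega
    interval_cases incercari <;> decide

theorem pv_regroup (m h : String) :
    "[ " ++ m ++ " ] " ++ "[" ++ h ++ "]" = "[ " ++ m ++ " ] [" ++ h ++ "]" := by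
  have h1 : (" ] " : String) ++ "[" = " ] [" := rfl
  calc "[ " ++ m ++ " ] " ++ "[" ++ h ++ "]"
      = "[ " ++ m ++ (" ] " ++ "[") ++ h ++ "]" := by simp [String.append_assoc]
    _ = "[ " ++ m ++ " ] [" ++ h ++ "]" := by rw [h1]

-- ===== VERDICT (by name: the statement is the Claim_ definition above) =====
theorem statusJoc_spec : Claim_equal_statusJoc := by
  intro litereGhicite cuvant incercari _ hpre
  unfold Spec_statusJoc
  simp only [statusJoc, statusJoc_alt]
  rw [pv_mask_eq litereGhicite cuvant.toList, pv_hang_eq incercari hpre, pv_regroup]
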